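-- pv_equiv track=rewrite | github.com/LizaPersonal/personal_exercises | historical_data/data_cleanup/check_route_destinations.py | identify_airports_in_route
-- ===== SOURCE A (Python) =====
-- def identify_airports_in_route(route):
--     """ Take in a route and identify each airport. """
--
--     airports = []
--     character_count = 0
--     while character_count < len(route):
--         airport_name = route.find("/", character_count)
--         if airport_name == -1:
--             airports.append(route[character_count:(character_count + 3)])
--             return airports
--         else:
--             airports.append(route[character_count:(character_count+3)])
--             character_count = airport_name + 1
--     return airports
-- ===== SOURCE B (Python) =====
-- def identify_airports_in_route(route):
--     """ Take in a route and identify each airport. """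
--     return [route[i:i + 3] for i, _ in enumerate(route) if i == 0 or route[i - 1] == "/"]
-- ===== Notes on version B (the rewrite author's own statement) =====
-- stated objective: idiomatic
-- what changed: Replaced the find-based forward-jumping while loop with a single comprehension over enumerate(route) that emits route[i:i+3] at every segment start (i==0 or a slash just before i).
import Mathlib
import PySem

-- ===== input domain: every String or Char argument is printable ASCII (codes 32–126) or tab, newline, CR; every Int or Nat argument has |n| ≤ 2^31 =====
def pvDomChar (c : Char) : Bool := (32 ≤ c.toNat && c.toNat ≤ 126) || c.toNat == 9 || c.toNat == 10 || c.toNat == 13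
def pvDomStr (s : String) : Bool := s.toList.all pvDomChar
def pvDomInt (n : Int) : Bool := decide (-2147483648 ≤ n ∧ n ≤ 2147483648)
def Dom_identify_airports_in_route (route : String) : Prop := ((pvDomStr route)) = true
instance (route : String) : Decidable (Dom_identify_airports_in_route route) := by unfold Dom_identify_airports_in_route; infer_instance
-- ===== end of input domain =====

-- B replaces A's find-based forward-jumping while loop by a single comprehension over
-- enumerate(route) emitting route[i:i+3] at every segment start (more idiomatic; same cost).

-- ===== PORT A =====
-- termination helper for A's loop: a successful find returns an index ≥ the start
theorem pvFindFrom_ge (cs : List Char) (c : Nat) (h : c < cs.length)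
    (hne : PySem.Chars.findFrom cs ['/'] (c : Int) none ≠ -1) :
    c ≤ (PySem.Chars.findFrom cs ['/'] (c : Int) none).toNat := by
  have hspec := PySem.Chars.findFrom_natCast_spec cs ['/'] c (le_of_lt h) hne
  omega

def identify_airports_in_route_go (cs : List Char) (c : Nat) (acc : List String) : List String :=
  if h : c < cs.length then
    let airport_name := PySem.Chars.findFrom cs ['/'] (c : Int) none
    if hne : airport_name = -1 then
      acc ++ [String.ofList (PySem.List.slice cs (some (c : Int)) (some ((c : Int) + 3)))]
    else
      identify_airports_in_route_go cs (airport_name.toNat + 1)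
        (acc ++ [String.ofList (PySem.List.slice cs (some (c : Int)) (some ((c : Int) + 3)))])
  else acc
termination_by cs.length - c
decreasing_by
  have := pvFindFrom_ge cs c h hne
  omega

def identify_airports_in_route (route : String) : List String :=
  identify_airports_in_route_go route.toList 0 []

-- ===== PORT B =====
def identify_airports_in_route_alt (route : String) : List String :=
  let cs := route.toList
  ((PySem.List.enumerate cs 0).filter
      (fun p => p.1 == 0 || PySem.List.pyGet? cs (p.1 - 1) == some '/')).map
    (fun p => String.ofList (PySem.List.slice cs (some p.1) (some (p.1 + 3))))

-- ===== PRECONDITION & SPEC =====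
def Spec_identify_airports_in_route (route : String) (out : List String) : Prop := out = identify_airports_in_route_alt route
instance (route : String) (out : List String) : Decidable (Spec_identify_airports_in_route route out) := by unfold Spec_identify_airports_in_route; infer_instance

-- ===== CLAIM (what is proved, stated in full; the proofs are below) =====
def Claim_equal_identify_airports_in_route : Prop := ∀ (route : String), Dom_identify_airports_in_route route → Spec_identify_airports_in_route route (identify_airports_in_route route)

-- ===== LEMMAS AND PROOFS =====

-- B's filter predicate, fixed over the whole list
def pvQ (cs : List Char) (p : Int × Char) : Bool :=
  p.1 == 0 || PySem.List.pyGet? cs (p.1 - 1) == some '/'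

theorem pvSlashAt (cs : List Char) (i : Nat) :
    cs[i]? = some '/' ↔ ['/'] <+: cs.drop i := by
  constructor
  · intro h
    have hh : (cs.drop i).head? = some '/' := by rw [List.head?_drop]; exact h
    cases hd : cs.drop i with
    | nil => rw [hd] at hh; simp at hh
    | cons x t => rw [hd] at hh; simp at hh; subst hh; exact ⟨t, rfl⟩
  · rintro ⟨t, ht⟩
    rw [← List.head?_drop, ← ht]; rfl

-- skipping a slash-free stretch: positions c+1 … c+k are not segment starts
theorem pvSkip (cs : List Char) (k : Nat) : ∀ (c : Nat),
    (∀ i, c ≤ i → i < c + k → cs[i]? ≠ some '/') →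
    ((PySem.List.enumerate (cs.drop (c + 1)) ((c : Int) + 1)).filter (pvQ cs)) =
      ((PySem.List.enumerate (cs.drop (c + k + 1)) ((c : Int) + (k : Int) + 1)).filter (pvQ cs)) := by
  induction k with
  | zero => intro c h; simp
  | succ k ih =>
    intro c h
    by_cases hc : c + 1 < cs.length
    · rw [List.drop_eq_getElem_cons hc, PySem.List.enumerate_cons, List.filter_cons]
      have hq : pvQ cs ((c : Int) + 1, cs[c + 1]) = false := by
        have h0 : cs[c]? ≠ some '/' := h c (le_refl c) (by omega)
        have : ((c : Int) + 1) - 1 = ((c : Nat) : Int) := by ring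
        simp only [pvQ, this, PySem.List.pyGet?_natCast]
        simp [h0]
        omega
      rw [hq]
      simp only [Bool.false_eq_true, if_false]
      have := ih (c + 1) (by intro i h1 h2; exact h i (by omega) (by omega))
      have e1 : c + 1 + 1 = c + 2 := by omega
      have e2 : c + 1 + k + 1 = c + (k + 1) + 1 := by omega
      have e3 : (((c + 1 : Nat) : Int) + 1) = ((c : Int) + 1 + 1) := by push_cast; ring
      have e4 : (((c + 1 : Nat) : Int) + (k : Int) + 1) = ((c : Int) + ((k : Nat) + 1 : Nat) + 1) := by push_cast; ring
      rw [e1, e2, e3, e4] at this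
      rw [← this]
    · have h1 : cs.drop (c + 1) = [] := List.drop_eq_nil_of_le (by omega)
      have h2 : cs.drop (c + (k + 1) + 1) = [] := List.drop_eq_nil_of_le (by omega)
      rw [h1, h2]; rfl

-- the same, phrased with the target index m
theorem pvSkipTo (cs : List Char) (c m : Nat) (hcm : c ≤ m)
    (hno : ∀ i, c ≤ i → i < m → cs[i]? ≠ some '/') :
    ((PySem.List.enumerate (cs.drop (c + 1)) ((c : Int) + 1)).filter (pvQ cs)) =
      ((PySem.List.enumerate (cs.drop (m + 1)) (((m + 1 : Nat) : Int))).filter (pvQ cs)) := by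
  have h := pvSkip cs (m - c) c (by intro i h1 h2; exact hno i h1 (by omega))
  have e1 : c + (m - c) + 1 = m + 1 := by omega
  have e2 : ((c : Int) + ((m - c : Nat) : Int) + 1) = (((m + 1 : Nat) : Int)) := by
    push_cast [Nat.sub_add_cancel]; omega
  rw [e1, e2] at h
  exact h

-- main loop invariant: at a segment start c, A's loop emits exactly B's filtered tail
theorem pvMain (cs : List Char) (n : Nat) : ∀ (c : Nat) (acc : List String),
    cs.length - c = n →
    ((c : Int) = 0 ∨ PySem.List.pyGet? cs ((c : Int) - 1) = some '/') →
    identify_airports_in_route_go cs c acc =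
      acc ++ ((PySem.List.enumerate (cs.drop c) (c : Int)).filter (pvQ cs)).map
        (fun p => String.ofList (PySem.List.slice cs (some p.1) (some (p.1 + 3)))) := by
  induction n using Nat.strong_induction_on with
  | _ n ih =>
    intro c acc hn hstart
    rw [identify_airports_in_route_go]
    by_cases h : c < cs.length
    · rw [dif_pos h]
      have hdropc : cs.drop c = cs[c] :: cs.drop (c + 1) := List.drop_eq_getElem_cons h
      have hQhead : pvQ cs ((c : Int), cs[c]) = true := by
        rcases hstart with h0 | hsl
        · simp [pvQ, h0]
        · simp [pvQ, hsl]
      rw [hdropc, PySem.List.enumerate_cons, List.filter_cons, hQhead]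
      by_cases hne : PySem.Chars.findFrom cs ['/'] (c : Int) none = -1
      · rw [dif_pos hne]
        have hno : ¬ (['/'] <:+: cs.drop c) :=
          (PySem.Chars.findFrom_natCast_eq_neg_one_iff cs ['/'] c (le_of_lt h)).mp hne
        have hnoi : ∀ i, c ≤ i → i < c + (cs.length - c - 1) → cs[i]? ≠ some '/' := by
          intro i hci _ hc'
          apply hno
          have hpre : ['/'] <+: (cs.drop c).drop (i - c) := by
            rw [List.drop_drop]
            have e : c + (i - c) = i := by omega
            rw [e]
            exact (pvSlashAt cs i).mp hc'
          have hin := (PySem.Chars.exists_prefix_drop_iff_isIn ['/'] (cs.drop c)).mp ⟨i - c, hpre⟩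
          exact (PySem.Chars.isIn_iff_infix ['/'] (cs.drop c)).mp hin
        have hempty := pvSkip cs (cs.length - c - 1) c hnoi
        have hnil : cs.drop (c + (cs.length - c - 1) + 1) = [] :=
          List.drop_eq_nil_of_le (by omega)
        rw [hnil] at hempty
        simp only [PySem.List.enumerate_nil, List.filter_nil] at hempty
        rw [hempty]
        simp
      · rw [dif_neg hne]
        obtain ⟨hge, hpre, hmin⟩ :=
          PySem.Chars.findFrom_natCast_spec cs ['/'] c (le_of_lt h) hne
        set m := (PySem.Chars.findFrom cs ['/'] (c : Int) none).toNat with hm_def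
        have hcm : c ≤ m := pvFindFrom_ge cs c h hne
        have hmget : cs[m]? = some '/' := (pvSlashAt cs m).mpr hpre
        have hrec := ih (cs.length - (m + 1)) (by omega) (m + 1)
          (acc ++ [String.ofList (PySem.List.slice cs (some (c : Int)) (some ((c : Int) + 3)))])
          rfl
          (Or.inr (by
            have e : (((m + 1 : Nat) : Int)) - 1 = ((m : Nat) : Int) := by push_cast; ring
            rw [e, PySem.List.pyGet?_natCast]
            exact hmget))
        rw [hrec]
        have hskip := pvSkipTo cs c m hcm (by
          intro i h1 h2 hc'
          exact hmin i (by exact_mod_cast h1) (by omega) ((pvSlashAt cs i).mp hc'))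
        rw [← hskip]
        simp
    · rw [dif_neg h]
      have hnil : cs.drop c = [] := List.drop_eq_nil_of_le (by omega)
      rw [hnil]
      simp

-- ===== VERDICT (by name: the statement is the Claim_ definition above) =====
theorem identify_airports_in_route_spec : Claim_equal_identify_airports_in_route := by
  intro route _
  unfold Spec_identify_airports_in_route identify_airports_in_route identify_airports_in_route_alt
  have h := pvMain route.toList (route.toList.length) 0 [] (by omega) (Or.inl (by norm_num))
  simpa [pvQ] using h
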